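-- pv_equiv track=rewrite | github.com/Xingqi-Xia/AI-Music-2025 | src/transformer/dataset/gp_process.py | augment_and_finalize
-- ===== SOURCE A (Python) =====
-- MIN_PITCH = 21
--
-- MAX_PITCH = 108
--
-- AUGMENT_RANGE = range(-5, 7)
--
-- BOS_TOKEN = 130  # Begin of Song (曲子开始)
--
-- EOS_TOKEN = 131 # End of Song (曲子结束)
--
-- def augment_and_finalize(sequence):
--     """
--     对单个序列进行数据增强（移调）并添加BOS/EOS标记。
--     """
--     augmented_sequences = []
--     # Pitch token 的有效范围
--     min_pitch_token = 2
--     max_pitch_token = MAX_PITCH - MIN_PITCH + 2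
--
--     for semitone in AUGMENT_RANGE:
--         # semitone=0 代表原始序列
--         if semitone == 0:
--             final_seq = [BOS_TOKEN] + sequence + [EOS_TOKEN]
--             augmented_sequences.append(final_seq)
--             continue
--
--         # --- 执行移调 ---
--         transposed_seq = []
--         is_valid = True
--         for token in sequence:
--             # 只对音高 token 进行移调
--             if token >= min_pitch_token:
--                 new_token = token + semitone
--                 # 检查移调后的音高是否在有效范围内
--                 if not (min_pitch_token <= new_token <= max_pitch_token):
--                     is_valid = False
--                     break
--                 transposed_seq.append(new_token)
--             else:
--                 # Rest (0) 和 Hold (1) token 保持不变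
--                 transposed_seq.append(token)
--
--         if is_valid:
--             final_seq = [BOS_TOKEN] + transposed_seq + [EOS_TOKEN]
--             augmented_sequences.append(final_seq)
--
--     return augmented_sequences
-- ===== SOURCE B (Python) =====
-- MIN_PITCH = 21
-- MAX_PITCH = 108
-- AUGMENT_RANGE = range(-5, 7)
-- BOS_TOKEN = 130
-- EOS_TOKEN = 131
--
-- def augment_and_finalize(sequence):
--     min_pitch_token = 2
--     max_pitch_token = MAX_PITCH - MIN_PITCH + 2
--     # one aggregation pass: min/max over pitch tokens (None if there are none)
--     bounds = None
--     for token in sequence: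
--         if token >= min_pitch_token:
--             if bounds is None:
--                 bounds = (token, token)
--             else:
--                 lo, hi = bounds
--                 bounds = (min(lo, token), max(hi, token))
--     out = []
--     for semitone in AUGMENT_RANGE:
--         if semitone == 0:
--             out.append([BOS_TOKEN] + sequence + [EOS_TOKEN])
--             continue
--         valid = bounds is None or (
--             bounds[0] + semitone >= min_pitch_token
--             and bounds[1] + semitone <= max_pitch_token
--         )
--         if valid:
--             transposed = [t + semitone if t >= min_pitch_token else t for t in sequence]
--             out.append([BOS_TOKEN] + transposed + [EOS_TOKEN])
--     return out
-- ===== Notes on version B (the rewrite author's own statement) =====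
-- stated objective: alternative
-- what changed: B precomputes the min/max pitch token in one aggregation pass and decides each semitone's validity from those bounds, building the transposed list with a comprehension only when valid, instead of A's per-semitone scan that checks every token's range while building.
import Mathlib
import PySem

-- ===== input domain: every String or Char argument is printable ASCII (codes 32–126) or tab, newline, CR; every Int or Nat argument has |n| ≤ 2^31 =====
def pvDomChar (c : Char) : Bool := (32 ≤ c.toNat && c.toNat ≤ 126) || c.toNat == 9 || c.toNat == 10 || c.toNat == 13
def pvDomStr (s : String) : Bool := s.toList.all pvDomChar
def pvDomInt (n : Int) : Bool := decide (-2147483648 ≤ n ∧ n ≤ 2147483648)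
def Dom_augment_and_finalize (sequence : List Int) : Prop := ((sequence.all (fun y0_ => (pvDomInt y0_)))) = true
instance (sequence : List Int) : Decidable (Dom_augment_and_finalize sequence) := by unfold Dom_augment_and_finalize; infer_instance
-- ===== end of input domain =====

-- B precomputes the min/max pitch token once and decides each semitone's validity from those bounds (alternative decomposition, same results).
-- ===== PORT A =====
-- inner per-semitone loop of A: none = is_valid set to False (the break)
def pvTransposeLoop (s : Int) : List Int → Option (List Int)
  | [] => some []
  | t :: ts =>
    if t ≥ 2 then
      if 2 ≤ t + s ∧ t + s ≤ 89 then (pvTransposeLoop s ts).map (fun r => (t + s) :: r)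
      else none
    else (pvTransposeLoop s ts).map (fun r => t :: r)

def augment_and_finalize (sequence : List Int) : List (List Int) :=
  (PySem.List.pyRange (-5) 7 1).foldl
    (fun acc semitone =>
      if semitone = 0 then acc ++ [[130] ++ sequence ++ [131]]
      else
        match pvTransposeLoop semitone sequence with
        | some transposed => acc ++ [[130] ++ transposed ++ [131]]
        | none => acc) []

-- ===== PORT B =====
-- the single aggregation pass of Source B: min/max over pitch tokens (none if there are none)
def pvBounds (sequence : List Int) : Option (Int × Int) :=
  sequence.foldl
    (fun bounds t =>
      if t ≥ 2 then
        match bounds with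
        | none => some (t, t)
        | some (lo, hi) => some (min lo t, max hi t)
      else bounds) none

-- Source B's `valid` expression for a nonzero semitone
def pvValidB (s : Int) : Option (Int × Int) → Bool
  | none => true
  | some (lo, hi) => decide (lo + s ≥ 2 ∧ hi + s ≤ 89)

def augment_and_finalize_alt (sequence : List Int) : List (List Int) :=
  let bounds := pvBounds sequence
  (PySem.List.pyRange (-5) 7 1).foldl
    (fun out semitone =>
      if semitone = 0 then out ++ [[130] ++ sequence ++ [131]]
      else if pvValidB semitone bounds then
        out ++ [[130] ++ (sequence.map (fun t => if t ≥ 2 then t + semitone else t)) ++ [131]]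
      else out) []

-- ===== PRECONDITION & SPEC =====
def Spec_augment_and_finalize (sequence : List Int) (out : List (List Int)) : Prop := out = augment_and_finalize_alt sequence
instance (sequence : List Int) (out : List (List Int)) : Decidable (Spec_augment_and_finalize sequence out) := by unfold Spec_augment_and_finalize; infer_instance

-- ===== CLAIM (what is proved, stated in full; the proofs are below) =====
def Claim_equal_augment_and_finalize : Prop := ∀ (sequence : List Int), Dom_augment_and_finalize sequence → Spec_augment_and_finalize sequence (augment_and_finalize sequence)

-- ===== LEMMAS AND PROOFS =====
-- all pitch tokens of l stay inside [2, 89] after transposing by s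
def pvOk (s : Int) (l : List Int) : Bool := l.all fun t => decide (t ≥ 2 → 2 ≤ t + s ∧ t + s ≤ 89)

theorem pvOk_cons (s t : Int) (ts : List Int) :
    pvOk s (t :: ts) = (decide (t ≥ 2 → 2 ≤ t + s ∧ t + s ≤ 89) && pvOk s ts) := by
  simp [pvOk]

theorem pvTransposeLoop_eq (s : Int) (l : List Int) :
    pvTransposeLoop s l =
      if pvOk s l then some (l.map (fun t => if t ≥ 2 then t + s else t)) else none := by
  induction l with
  | nil => simp [pvTransposeLoop, pvOk]
  | cons t ts ih =>
    rw [pvTransposeLoop, ih, pvOk_cons]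
    by_cases h2 : t ≥ 2
    · by_cases hr : 2 ≤ t + s ∧ t + s ≤ 89
      · by_cases hok : pvOk s ts = true <;> simp [h2, hr, hok]
      · simp [h2, hr]
    · by_cases hok : pvOk s ts = true <;> simp [h2, hok]

theorem pvBounds_valid (s : Int) (l : List Int) : ∀ b : Option (Int × Int),
    (pvValidB s (l.foldl
      (fun bounds t =>
        if t ≥ 2 then
          match bounds with
          | none => some (t, t)
          | some (lo, hi) => some (min lo t, max hi t)
        else bounds) b) = true) ↔ (pvValidB s b = true ∧ pvOk s l = true) := by
  induction l with
  | nil => intro b; simp [pvOk]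
  | cons t ts ih =>
    intro b
    rw [List.foldl_cons, ih, pvOk_cons]
    simp only [Bool.and_eq_true, decide_eq_true_eq]
    have hstep : (pvValidB s (if t ≥ 2 then
          match b with
          | none => some (t, t)
          | some (lo, hi) => some (min lo t, max hi t)
        else b) = true) ↔ (pvValidB s b = true ∧ (t ≥ 2 → 2 ≤ t + s ∧ t + s ≤ 89)) := by
      by_cases h2 : t ≥ 2
      · cases b with
        | none => simp [pvValidB, h2] <;> omega
        | some p =>
          obtain ⟨lo, hi⟩ := p
          simp [pvValidB, h2] <;> omega
      · simp [h2]
    rw [hstep]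
    by_cases hb : pvValidB s b = true <;> by_cases hc : t ≥ 2 → 2 ≤ t + s ∧ t + s ≤ 89 <;>
      simp [hb, hc] <;> tauto

theorem pvStep_eq (sequence : List Int) (acc : List (List Int)) (semitone : Int) :
    (if semitone = 0 then acc ++ [[130] ++ sequence ++ [131]]
      else
        match pvTransposeLoop semitone sequence with
        | some transposed => acc ++ [[130] ++ transposed ++ [131]]
        | none => acc) =
    (if semitone = 0 then acc ++ [[130] ++ sequence ++ [131]]
      else if pvValidB semitone (pvBounds sequence) then
        acc ++ [[130] ++ (sequence.map (fun t => if t ≥ 2 then t + semitone else t)) ++ [131]]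
      else acc) := by
  by_cases h0 : semitone = 0
  · simp [h0]
  · have hv : pvValidB semitone (pvBounds sequence) = true ↔ pvOk semitone sequence = true := by
      have := pvBounds_valid semitone sequence none
      simpa [pvBounds, pvValidB] using this
    rw [pvTransposeLoop_eq]
    by_cases hok : pvOk semitone sequence = true
    · simp [h0, hok, hv.mpr hok]
    · have hne : ¬ pvValidB semitone (pvBounds sequence) = true := fun h => hok (hv.mp h)
      simp [h0, hok, hne]

-- ===== VERDICT (by name: the statement is the Claim_ definition above) =====
theorem augment_and_finalize_spec : Claim_equal_augment_and_finalize := by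
  intro sequence _
  show augment_and_finalize sequence = augment_and_finalize_alt sequence
  simp only [augment_and_finalize, augment_and_finalize_alt]
  congr 1
  funext acc s
  exact pvStep_eq sequence acc s
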